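-- pv_equiv track=rewrite | github.com/alfasi/uuencoding | uuencoding.py | bytes_to_uuencoding
-- ===== SOURCE A (Python) =====
-- def bytes_to_uuencoding(array, mode, filename):
--     result = 'begin ' + str(mode) + ' ' + filename + '\n'
--
--     remaining_bytes = len(array)
--
--     while remaining_bytes > 0:
--         # Handle line (45 characters)
--         if remaining_bytes >= 45:
--             line = array[len(array) - remaining_bytes :
--                          len(array) - remaining_bytes + 45]
--         else:
--             line = array[len(array) - remaining_bytes :]
--
--             # 0 padding
--             if len(line) % 3 == 1:
--                 line += str(chr(0)) + str(chr(0))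
--             elif len(line) % 3 == 2:
--                 line += str(chr(0))
--
--         remaining_bytes -= len(line)
--
--         formatted_line = ''
--
--         for i in range(0, len(line), 3):
--             letter_group = chr(32 + (ord(line[i]) >> 2))
--             letter_group += chr(32 + (((ord(line[i]) & 0b00000011) << 4) | (ord(line[i+1]) >> 4)))
--             letter_group += chr(32 + (((ord(line[i+1]) & 0b00001111) << 2) |
--                                 ord(line[i+2]) >> 6))
--             letter_group += chr(32 + (ord(line[i+2]) & 0b00111111 ))
--
--             formatted_line += letter_group
--
--         result += str(chr(32 + len(line))) + formatted_line + '\n'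
--
--     result += '`\nend\n'
--
--     return result
-- ===== SOURCE B (Python) =====
-- def bytes_to_uuencoding(array, mode, filename):
--     # encode-then-segment: pad the whole input to a multiple of 3, do one flat
--     # encoding pass, then slice the flat text into 60-char lines.
--     data = array + chr(0) * (-len(array) % 3)
--     flat = []
--     for i in range(0, len(data), 3):
--         a, b, c = ord(data[i]), ord(data[i + 1]), ord(data[i + 2])
--         flat.append(chr(32 + a // 4))
--         flat.append(chr(32 + a % 4 * 16 + b // 16))
--         flat.append(chr(32 + b % 16 * 4 + c // 64))
--         flat.append(chr(32 + c % 64))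
--     flat = ''.join(flat)
--     body = []
--     for j in range(0, len(flat), 60):
--         seg = flat[j:j + 60]
--         body.append(chr(32 + 3 * len(seg) // 4) + seg + '\n')
--     return 'begin ' + str(mode) + ' ' + filename + '\n' + ''.join(body) + '`\nend\n'
-- ===== Notes on version B (the rewrite author's own statement) =====
-- stated objective: alternative
-- what changed: A segments the input into 45-byte lines and pads/encodes each line inside the while loop; B pads the whole input once, encodes it in a single flat pass with div/mod arithmetic, and then slices the flat text into 60-character lines, deriving each length byte from the segment length.
import Mathlib
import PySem

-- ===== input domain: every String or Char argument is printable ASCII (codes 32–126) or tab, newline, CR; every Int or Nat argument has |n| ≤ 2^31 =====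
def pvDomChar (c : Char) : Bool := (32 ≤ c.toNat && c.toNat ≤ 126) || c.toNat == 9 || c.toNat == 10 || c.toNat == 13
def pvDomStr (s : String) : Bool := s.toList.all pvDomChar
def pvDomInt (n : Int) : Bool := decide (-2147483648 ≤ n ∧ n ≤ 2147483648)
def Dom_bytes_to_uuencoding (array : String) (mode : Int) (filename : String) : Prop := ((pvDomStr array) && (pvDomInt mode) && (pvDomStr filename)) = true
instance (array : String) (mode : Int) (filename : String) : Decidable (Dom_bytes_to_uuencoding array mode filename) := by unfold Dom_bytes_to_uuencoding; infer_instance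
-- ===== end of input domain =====

-- B pads the whole input once, encodes it in one flat pass, then slices into 60-char lines;
-- A pads and encodes 45-byte lines one at a time.  Equal output is proved on Dom.

-- ===== PORT A =====

-- zero-padding of the (short last) line, as in A's `if len(line) % 3 == 1 … elif … == 2 …`
def pvPadA (l : List Char) : List Char :=
  if l.length % 3 = 1 then l ++ [Char.ofNat 0, Char.ofNat 0]
  else if l.length % 3 = 2 then l ++ [Char.ofNat 0]
  else l

theorem pvPadA_len_ge (l : List Char) : l.length ≤ (pvPadA l).length := by
  unfold pvPadA; split_ifs <;> simp

-- A's inner `for i in range(0, len(line), 3)` building formatted_line (shift/and/or bit math)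
def pvEncLineA : List Char → List Char
  | a :: b :: c :: rest =>
      [Char.ofNat (32 + (a.toNat >>> 2)),
       Char.ofNat (32 + (((a.toNat &&& 3) <<< 4) ||| (b.toNat >>> 4))),
       Char.ofNat (32 + (((b.toNat &&& 15) <<< 2) ||| (c.toNat >>> 6))),
       Char.ofNat (32 + (c.toNat &&& 63))] ++ pvEncLineA rest
  | _ => []

-- A's while loop; the state `remaining_bytes` is carried as the remaining suffix of the array
-- A's `line` for the current iteration (full 45-byte slice, or the padded short tail)
def pvLineA (cs : List Char) : List Char :=
  if 45 ≤ cs.length then cs.take 45 else pvPadA cs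

theorem pvLineA_pos (cs : List Char) (h : cs ≠ []) : 0 < (pvLineA cs).length := by
  have h1 : cs.length ≠ 0 := by simpa using (fun hl => h (List.eq_nil_of_length_eq_zero hl))
  unfold pvLineA
  split
  · simp; omega
  · have := pvPadA_len_ge cs; omega

def pvLoopA (cs : List Char) : List Char :=
  if h : cs = [] then []
  else
    (Char.ofNat (32 + (pvLineA cs).length) :: pvEncLineA (pvLineA cs))
      ++ '\n' :: pvLoopA (cs.drop (pvLineA cs).length)
termination_by cs.length
decreasing_by
  have h1 : cs.length ≠ 0 := by simpa using (fun hl => h (List.eq_nil_of_length_eq_zero hl))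
  have := pvLineA_pos cs h
  simp only [List.length_drop]
  omega

def bytes_to_uuencoding (array : String) (mode : Int) (filename : String) : String :=
  "begin " ++ PySem.Int.toStr mode ++ " " ++ filename ++ "\n"
    ++ String.ofList (pvLoopA array.toList) ++ "`\nend\n"

-- ===== PORT B =====

-- pad the WHOLE input to a multiple of 3 (Source B: array + chr(0) * (-len(array) % 3))
def pvPadB (l : List Char) : List Char :=
  l ++ List.replicate ((3 - l.length % 3) % 3) (Char.ofNat 0)

-- one flat encoding pass over all 3-byte groups (div/mod arithmetic)
def pvEncFlatB : List Char → List Char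
  | a :: b :: c :: rest =>
      Char.ofNat (32 + a.toNat / 4)
        :: Char.ofNat (32 + a.toNat % 4 * 16 + b.toNat / 16)
        :: Char.ofNat (32 + b.toNat % 16 * 4 + c.toNat / 64)
        :: Char.ofNat (32 + c.toNat % 64)
        :: pvEncFlatB rest
  | _ => []

-- slice the flat text into 60-char segments, each prefixed by its length byte
def pvSegB (s : List Char) : List Char :=
  if s = [] then []
  else (Char.ofNat (32 + 3 * (s.take 60).length / 4) :: s.take 60) ++ '\n' :: pvSegB (s.drop 60)
termination_by s.length
decreasing_by
  rename_i h
  have : s.length ≠ 0 := by simpa using (fun hl => h (List.eq_nil_of_length_eq_zero hl))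
  simp only [List.length_drop]; omega

def bytes_to_uuencoding_alt (array : String) (mode : Int) (filename : String) : String :=
  "begin " ++ PySem.Int.toStr mode ++ " " ++ filename ++ "\n"
    ++ String.ofList (pvSegB (pvEncFlatB (pvPadB array.toList))) ++ "`\nend\n"

-- ===== PRECONDITION & SPEC =====
def Spec_bytes_to_uuencoding (array : String) (mode : Int) (filename : String) (out : String) : Prop := out = bytes_to_uuencoding_alt array mode filename
instance (array : String) (mode : Int) (filename : String) (out : String) : Decidable (Spec_bytes_to_uuencoding array mode filename out) := by unfold Spec_bytes_to_uuencoding; infer_instance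

-- ===== CLAIM (what is proved, stated in full; the proofs are below) =====
def Claim_equal_bytes_to_uuencoding : Prop := ∀ (array : String) (mode : Int) (filename : String), Dom_bytes_to_uuencoding array mode filename → Spec_bytes_to_uuencoding array mode filename (bytes_to_uuencoding array mode filename)

-- ===== LEMMAS AND PROOFS =====

-- the two group encodings agree on bytes < 128
theorem grp1 (a : Nat) : a >>> 2 = a / 4 := by
  simp [Nat.shiftRight_eq_div_pow]

theorem grp2 (a b : Nat) (hb : b < 128) :
    ((a &&& 3) <<< 4) ||| (b >>> 4) = a % 4 * 16 + b / 16 := by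
  have h3 : a &&& 3 = a % 4 := by simpa using Nat.and_two_pow_sub_one_eq_mod a 2
  have h4 : b >>> 4 = b / 16 := by simp [Nat.shiftRight_eq_div_pow]
  rw [h3, h4]
  have key : ∀ x < 4, ∀ y < 8, (x <<< 4) ||| y = x * 16 + y := by decide
  exact key (a % 4) (Nat.mod_lt a (by omega)) (b / 16) (by omega)

theorem grp3 (b c : Nat) (hc : c < 128) :
    ((b &&& 15) <<< 2) ||| (c >>> 6) = b % 16 * 4 + c / 64 := by
  have h3 : b &&& 15 = b % 16 := by simpa using Nat.and_two_pow_sub_one_eq_mod b 4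
  have h4 : c >>> 6 = c / 64 := by simp [Nat.shiftRight_eq_div_pow]
  rw [h3, h4]
  have key : ∀ x < 16, ∀ y < 2, (x <<< 2) ||| y = x * 4 + y := by decide
  exact key (b % 16) (Nat.mod_lt b (by omega)) (c / 64) (by omega)

theorem grp4 (c : Nat) : c &&& 63 = c % 64 := by
  simpa using Nat.and_two_pow_sub_one_eq_mod c 6

-- A's per-line encoder equals B's flat encoder on lists of bytes < 128
theorem encA_eq_encB : ∀ l : List Char, (∀ c ∈ l, c.toNat < 128) → pvEncLineA l = pvEncFlatB l
  | [], _ => rfl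
  | [a], _ => rfl
  | [a, b], _ => rfl
  | a :: b :: c :: rest, h => by
      have ha := h a (by simp); have hb := h b (by simp); have hc := h c (by simp)
      unfold pvEncLineA pvEncFlatB
      rw [grp1, grp2 _ _ hb, grp3 _ _ hc, grp4,
        encA_eq_encB rest (fun x hx => h x (by simp [hx]))]
      simp only [List.cons_append, List.nil_append, List.cons.injEq, and_true, true_and]
      exact ⟨by congr 1; ring, by congr 1; ring⟩

theorem pvPadB_mod (l : List Char) : (pvPadB l).length % 3 = 0 := by
  simp only [pvPadB, List.length_append, List.length_replicate]; omega

theorem pvPadB_len_lt (l : List Char) (h : l ≠ []) : 0 < (pvPadB l).length ∧ l.length ≤ (pvPadB l).length ∧ (pvPadB l).length ≤ l.length + 2 := by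
  have : l.length ≠ 0 := by simpa using (fun hl => h (List.eq_nil_of_length_eq_zero hl))
  simp only [pvPadB, List.length_append, List.length_replicate]; omega

-- on a short last line A's padding and B's global padding coincide
theorem padA_eq_padB (l : List Char) : pvPadA l = pvPadB l := by
  unfold pvPadA pvPadB
  split_ifs with h1 h2
  · rw [h1]; rfl
  · rw [h2]; rfl
  · have : (3 - l.length % 3) % 3 = 0 := by omega
    simp [this]

-- B's global padding splits off a full 45-byte line
theorem padB_split (l : List Char) (h : 45 ≤ l.length) :
    pvPadB l = l.take 45 ++ pvPadB (l.drop 45) := by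
  unfold pvPadB
  have hd : (l.drop 45).length = l.length - 45 := by simp
  have hm : (3 - (l.drop 45).length % 3) % 3 = (3 - l.length % 3) % 3 := by rw [hd]; omega
  rw [hm, ← List.append_assoc, List.take_append_drop]

theorem encFlatB_append : ∀ x : List Char, x.length % 3 = 0 → ∀ y,
    pvEncFlatB (x ++ y) = pvEncFlatB x ++ pvEncFlatB y
  | [], _, y => rfl
  | [a], h, y => by simp at h
  | [a, b], h, y => by simp at h
  | a :: b :: c :: rest, h, y => by
      have h' : rest.length % 3 = 0 := by simp at h; omega
      simp only [List.cons_append, pvEncFlatB]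
      simp [encFlatB_append rest h' y]

theorem encFlatB_length : ∀ x : List Char, (pvEncFlatB x).length = 4 * (x.length / 3)
  | [] => by simp [pvEncFlatB]
  | [a] => by simp [pvEncFlatB]
  | [a, b] => by simp [pvEncFlatB]
  | a :: b :: c :: rest => by
      simp only [pvEncFlatB, List.length_cons, encFlatB_length rest]
      omega

-- main loop correspondence: A's line loop = B's (flat encode of the globally padded input, then segment)
theorem nil_case : pvLoopA [] = pvSegB (pvEncFlatB (pvPadB [])) := by
  have h1 : pvPadB [] = [] := by simp [pvPadB]
  have h2 : pvEncFlatB [] = [] := rfl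
  have h3 : pvSegB [] = [] := by rw [pvSegB]; simp
  rw [pvLoopA, h1, h2, h3]; simp

theorem loop_eq : ∀ (n : Nat) (cs : List Char), cs.length ≤ n → (∀ c ∈ cs, c.toNat < 128) →
    pvLoopA cs = pvSegB (pvEncFlatB (pvPadB cs)) := by
  intro n
  induction n with
  | zero =>
      intro cs hlen _
      have : cs = [] := List.eq_nil_of_length_eq_zero (by omega)
      subst this; exact nil_case
  | succ n ih =>
      intro cs hlen hchars
      by_cases hnil : cs = []
      · subst hnil; exact nil_case
      · rw [pvLoopA, dif_neg hnil]
        by_cases h45 : 45 ≤ cs.length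
        · -- full line of 45 bytes
          simp only [pvLineA, if_pos h45]
          have htl : (cs.take 45).length = 45 := by simp; omega
          have hsplit := padB_split cs h45
          rw [hsplit, encFlatB_append _ (by rw [htl]) _]
          set E := pvEncFlatB (cs.take 45) with hE
          set R := pvEncFlatB (pvPadB (cs.drop 45)) with hR
          have hElen : E.length = 60 := by rw [hE, encFlatB_length, htl]
          rw [pvSegB]
          have hne : E ++ R ≠ [] := by
            intro hc
            have : (E ++ R).length = 0 := by rw [hc]; rfl
            simp [hElen] at this
          rw [if_neg hne]
          have htake : (E ++ R).take 60 = E := by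
            rw [← hElen, List.take_left]
          have hdrop : (E ++ R).drop 60 = R := by
            rw [← hElen, List.drop_left]
          rw [htake, hdrop]
          have hIH : pvLoopA (cs.drop 45) = pvSegB R := by
            rw [hR]
            exact ih (cs.drop 45) (by simp; omega)
              (fun x hx => hchars x (List.mem_of_mem_drop hx))
          rw [htl, hE, encA_eq_encB (cs.take 45) (fun x hx => hchars x (List.mem_of_mem_take hx)),
            hIH, hElen]
        · -- short last line: A pads it, B has padded globally; both terminate after it
          simp only [pvLineA, if_neg h45]
          rw [padA_eq_padB]
          have hmod := pvPadB_mod cs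
          have hbnd := pvPadB_len_lt cs hnil
          have hlenE : (pvEncFlatB (pvPadB cs)).length = 4 * ((pvPadB cs).length / 3) :=
            encFlatB_length _
          have hle60 : (pvEncFlatB (pvPadB cs)).length ≤ 60 := by rw [hlenE]; omega
          have hpos : 0 < (pvEncFlatB (pvPadB cs)).length := by rw [hlenE]; omega
          rw [pvSegB]
          have hne : pvEncFlatB (pvPadB cs) ≠ [] := by
            intro hc; rw [hc] at hpos; simp at hpos
          rw [if_neg hne]
          have htake : (pvEncFlatB (pvPadB cs)).take 60 = pvEncFlatB (pvPadB cs) :=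
            List.take_of_length_le hle60
          have hdropE : (pvEncFlatB (pvPadB cs)).drop 60 = [] :=
            List.drop_eq_nil_of_le hle60
          have hdropA : cs.drop (pvPadB cs).length = [] :=
            List.drop_eq_nil_of_le (by omega)
          rw [htake, hdropE, hdropA, pvLoopA, pvSegB]
          simp only [reduceIte, reduceDIte]
          obtain ⟨k, hk⟩ : ∃ k, (pvPadB cs).length = 3 * k := ⟨(pvPadB cs).length / 3, by omega⟩
          have hbyte : 3 * (pvEncFlatB (pvPadB cs)).length / 4 = (pvPadB cs).length := by
            rw [hlenE, hk]; omega
          have hchars' : ∀ c ∈ pvPadB cs, c.toNat < 128 := by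
            intro x hx
            rcases List.mem_append.mp hx with h | h
            · exact hchars x h
            · rw [List.eq_of_mem_replicate h]; decide
          rw [hbyte, encA_eq_encB _ hchars']

-- Dom gives: every character of the input is an ASCII byte < 128
theorem dom_chars (array : String) (mode : Int) (filename : String)
    (h : Dom_bytes_to_uuencoding array mode filename) : ∀ c ∈ array.toList, c.toNat < 128 := by
  intro c hc
  unfold Dom_bytes_to_uuencoding at h
  simp only [Bool.and_eq_true, pvDomStr, List.all_eq_true] at h
  have := h.1.1 c hc
  simp only [pvDomChar, Bool.or_eq_true, Bool.and_eq_true, beq_iff_eq, decide_eq_true_eq] at this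
  omega

-- ===== VERDICT (by name: the statement is the Claim_ definition above) =====
theorem bytes_to_uuencoding_spec : Claim_equal_bytes_to_uuencoding := by
  intro array mode filename hdom
  unfold Spec_bytes_to_uuencoding bytes_to_uuencoding bytes_to_uuencoding_alt
  rw [loop_eq array.toList.length array.toList le_rfl (dom_chars array mode filename hdom)]
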